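-- pv_equiv track=rewrite | github.com/drussell23/JARVIS-AI | backend/api/unified_command_processor.py | _detect_system_indicators
-- ===== SOURCE A (Python) =====
-- from typing import Dict, Any, Optional, List, Tuple
--
-- def _detect_system_indicators(words: List[str]) -> int:
--     """Count system-related indicators in words"""
--     indicators = 0
--
--     # System settings
--     settings_words = {
--         "volume",
--         "brightness",
--         "wifi",
--         "bluetooth",
--         "display",
--         "sound",
--         "network",
--     }
--     indicators += sum(1 for word in words if word in settings_words)
--
--     # System actions
--     action_words = {"screenshot", "restart", "shutdown", "sleep", "lock", "unlock"}
--     indicators += sum(1 for word in words if word in action_words)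
--
--     # File operations
--     file_words = {
--         "file",
--         "folder",
--         "directory",
--         "document",
--         "save",
--         "open",
--         "create",
--     }
--     indicators += sum(1 for word in words if word in file_words)
--
--     return indicators
-- ===== SOURCE B (Python) =====
-- from typing import List
--
-- def _detect_system_indicators(words: List[str]) -> int:
--     """Count system-related indicators in words (single counting pass,
--     then sum counts over the fixed keyword sets)."""
--     counts = {}
--     for w in words:
--         counts[w] = counts.get(w, 0) + 1
--
--     settings_words = {
--         "volume", "brightness", "wifi", "bluetooth", "display", "sound", "network",
--     }
--     action_words = {"screenshot", "restart", "shutdown", "sleep", "lock", "unlock"}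
--     file_words = {
--         "file", "folder", "directory", "document", "save", "open", "create",
--     }
--     return (
--         sum(counts.get(w, 0) for w in settings_words)
--         + sum(counts.get(w, 0) for w in action_words)
--         + sum(counts.get(w, 0) for w in file_words)
--     )
-- ===== Notes on version B (the rewrite author's own statement) =====
-- stated objective: alternative
-- what changed: B builds a frequency table of the input in one pass and then sums the counts of each fixed keyword over the three keyword sets, instead of scanning the input list three times with membership tests.
import Mathlib
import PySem

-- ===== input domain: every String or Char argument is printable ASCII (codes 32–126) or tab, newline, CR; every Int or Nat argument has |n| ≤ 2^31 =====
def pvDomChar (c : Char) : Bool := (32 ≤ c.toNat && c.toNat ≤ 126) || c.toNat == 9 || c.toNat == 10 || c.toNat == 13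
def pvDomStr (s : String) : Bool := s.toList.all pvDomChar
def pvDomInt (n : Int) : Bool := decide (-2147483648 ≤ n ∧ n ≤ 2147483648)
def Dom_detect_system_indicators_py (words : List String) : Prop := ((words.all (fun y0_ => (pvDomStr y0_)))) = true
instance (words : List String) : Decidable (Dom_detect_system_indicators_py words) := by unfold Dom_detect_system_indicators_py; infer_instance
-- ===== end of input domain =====

-- ===== PORT A =====
-- B differs from A only in counting strategy (same return value); header: alternative decomposition.
def detect_system_indicators_py (words : List String) : Int :=
  let indicators : Int := 0
  let settings_words : PySem.Set String :=
    PySem.Set.ofList ["volume", "brightness", "wifi", "bluetooth", "display", "sound", "network"]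
  let indicators := indicators +
    ((words.filter (fun word => PySem.Set.contains settings_words word)).map (fun _ => (1 : Int))).sum
  let action_words : PySem.Set String :=
    PySem.Set.ofList ["screenshot", "restart", "shutdown", "sleep", "lock", "unlock"]
  let indicators := indicators +
    ((words.filter (fun word => PySem.Set.contains action_words word)).map (fun _ => (1 : Int))).sum
  let file_words : PySem.Set String :=
    PySem.Set.ofList ["file", "folder", "directory", "document", "save", "open", "create"]
  let indicators := indicators +
    ((words.filter (fun word => PySem.Set.contains file_words word)).map (fun _ => (1 : Int))).sum
  indicators

-- ===== PORT B =====
def detect_system_indicators_py_alt (words : List String) : Int :=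
  let counts : PySem.Dict String Int :=
    words.foldl (fun d w => d.insert w (d.getD w 0 + 1)) PySem.Dict.empty
  let settings_words : PySem.Set String :=
    PySem.Set.ofList ["volume", "brightness", "wifi", "bluetooth", "display", "sound", "network"]
  let action_words : PySem.Set String :=
    PySem.Set.ofList ["screenshot", "restart", "shutdown", "sleep", "lock", "unlock"]
  let file_words : PySem.Set String :=
    PySem.Set.ofList ["file", "folder", "directory", "document", "save", "open", "create"]
  (settings_words.map (fun w => counts.getD w 0)).sum
    + (action_words.map (fun w => counts.getD w 0)).sum
    + (file_words.map (fun w => counts.getD w 0)).sum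

-- ===== PRECONDITION & SPEC =====
def Spec_detect_system_indicators_py (words : List String) (out : Int) : Prop := out = detect_system_indicators_py_alt words
instance (words : List String) (out : Int) : Decidable (Spec_detect_system_indicators_py words out) := by unfold Spec_detect_system_indicators_py; infer_instance

-- ===== CLAIM (what is proved, stated in full; the proofs are below) =====
def Claim_equal_detect_system_indicators_py : Prop := ∀ (words : List String), Dom_detect_system_indicators_py words → Spec_detect_system_indicators_py words (detect_system_indicators_py words)

-- ===== LEMMAS AND PROOFS =====

-- sum of the 0/1 indicator of w over a duplicate-free list S is 1 iff w ∈ S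
lemma sum_map_indicator (S : List String) (h : S.Nodup) (w : String) :
    (S.map (fun k => if k = w then (1 : Int) else 0)).sum = if w ∈ S then 1 else 0 := by
  induction S with
  | nil => simp
  | cons k S ih =>
    simp only [List.nodup_cons] at h
    by_cases hk : k = w
    · subst hk
      simp [ih h.2, h.1]
    · simp [hk, ih h.2, List.mem_cons, Ne.symm hk]

-- one keyword set: counting matching words equals summing per-keyword counts
lemma filter_len_eq_sum_count (S : List String) (h : S.Nodup) (ws : List String) :
    (((ws.filter (fun w => decide (w ∈ S))).length : Nat) : Int)
      = (S.map (fun k => (ws.count k : Int))).sum := by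
  induction ws with
  | nil => simp
  | cons w ws ih =>
    have hrhs : (S.map (fun k => (((w :: ws).count k : Nat) : Int))).sum
        = (S.map (fun k => (ws.count k : Int))).sum
          + (S.map (fun k => if k = w then (1 : Int) else 0)).sum := by
      rw [← PySem.List.sum_map_add_int]
      refine congrArg List.sum (List.map_congr_left ?_)
      intro k _
      by_cases hk : k = w
      · subst hk; simp
      · simp [hk, Ne.symm hk]
    rw [hrhs, sum_map_indicator S h w, ← ih]
    by_cases hm : w ∈ S <;> simp [hm]

-- ===== VERDICT (by name: the statement is the Claim_ definition above) =====
theorem detect_system_indicators_py_spec : Claim_equal_detect_system_indicators_py := by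
  intro words _
  unfold Spec_detect_system_indicators_py detect_system_indicators_py detect_system_indicators_py_alt
  have h1 : (["volume", "brightness", "wifi", "bluetooth", "display", "sound", "network"] : List String).Nodup := by decide
  have h2 : (["screenshot", "restart", "shutdown", "sleep", "lock", "unlock"] : List String).Nodup := by decide
  have h3 : (["file", "folder", "directory", "document", "save", "open", "create"] : List String).Nodup := by decide
  have e1 : PySem.Set.ofList (["volume", "brightness", "wifi", "bluetooth", "display", "sound", "network"] : List String) = ["volume", "brightness", "wifi", "bluetooth", "display", "sound", "network"] := by decide
  have e2 : PySem.Set.ofList (["screenshot", "restart", "shutdown", "sleep", "lock", "unlock"] : List String) = ["screenshot", "restart", "shutdown", "sleep", "lock", "unlock"] := by decide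
  have e3 : PySem.Set.ofList (["file", "folder", "directory", "document", "save", "open", "create"] : List String) = ["file", "folder", "directory", "document", "save", "open", "create"] := by decide
  simp only [PySem.Dict.getD_foldl_insert_add_one, PySem.Dict.getD_empty,
    e1, e2, e3, PySem.Set.contains_eq_listContains,
    List.contains_eq_mem, PySem.List.sum_map_const_int, mul_one, zero_add]
  rw [filter_len_eq_sum_count _ h1 words, filter_len_eq_sum_count _ h2 words,
    filter_len_eq_sum_count _ h3 words]
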